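-- pv_equiv track=rewrite | github.com/magentapowa/codility-tasks | L4-FrogRiverOne.py | solution
-- ===== SOURCE A (Python) =====
-- def solution(X, A):
--     steps = [x  for x in range(1,X+1)]
--
--     #check if all steps are in A
--     for s in steps:
--         if s not in A:
--             return -1
--
--     # for index,l in enumerate(A):
--     #     if l in steps
--     #         steps.remove(l)
--     #         if steps==[]:
--     #             return index
--
--     positions = []
--
--     for s in steps:
--         positions.append(A.index(s))
--     return max(positions)
-- ===== SOURCE B (Python) =====
-- def solution(X, A):
--     seen = set()
--     for i, a in enumerate(A):
--         if 1 <= a <= X and a not in seen: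
--             seen.add(a)
--             if len(seen) == X:
--                 return i
--     return -1
-- ===== Notes on version B (the rewrite author's own statement) =====
-- stated objective: alternative
-- what changed: Replaces A's per-step membership test plus per-step A.index scan by a single left-to-right pass that records first-seen in-range values in a set and returns the index at which the count reaches X.
import Mathlib
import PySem

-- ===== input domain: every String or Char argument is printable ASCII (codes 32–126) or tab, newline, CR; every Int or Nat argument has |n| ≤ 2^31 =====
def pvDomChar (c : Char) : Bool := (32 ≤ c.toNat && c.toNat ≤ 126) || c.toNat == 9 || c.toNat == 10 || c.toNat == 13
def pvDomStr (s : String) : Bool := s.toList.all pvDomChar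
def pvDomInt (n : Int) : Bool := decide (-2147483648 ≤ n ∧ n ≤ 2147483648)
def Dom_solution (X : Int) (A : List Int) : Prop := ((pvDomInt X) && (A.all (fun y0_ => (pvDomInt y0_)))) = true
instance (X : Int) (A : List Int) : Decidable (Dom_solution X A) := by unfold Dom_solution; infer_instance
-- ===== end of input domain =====

-- One honest line: B replaces A's per-step membership test and per-step A.index scan by a
-- single left-to-right pass tracking first-seen in-range values in a set (alternative algorithm).

-- ===== PORT A =====
-- literal port of Source A: steps = range(1, X+1); early -1 if a step is missing;
-- else positions = [A.index(s) for s in steps]; return max(positions).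
-- (max([]) raises ValueError in Python: that case, X ≤ 0, is excluded by Pre_solution.)
def solution (X : Int) (A : List Int) : Int :=
  let steps := PySem.List.pyRange 1 (X+1) 1
  if steps.any (fun s => !(A.contains s)) then -1
  else
    let positions : List Int := steps.map (fun s => (((PySem.List.index? A s).getD 0 : Nat) : Int))
    match PySem.List.max? positions (fun y => y) with
    | some m => m
    | none => -1   -- unreachable under Pre_solution (Python raises ValueError here)

-- ===== PORT B =====
-- literal port of Source B's loop: i is the enumerate index, seen the Python set.
def solAltLoop (X : Int) : List Int → Int → PySem.Set Int → Int
  | [], _, _ => -1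
  | a :: rest, i, seen =>
    if 1 ≤ a ∧ a ≤ X ∧ ¬ (a ∈ seen) then
      let seen' := PySem.Set.add seen a
      if (seen'.length : Int) = X then i else solAltLoop X rest (i+1) seen'
    else solAltLoop X rest (i+1) seen

def solution_alt (X : Int) (A : List Int) : Int :=
  solAltLoop X A 0 PySem.Set.empty

-- ===== PRECONDITION & SPEC =====
-- Pre_ excludes exactly X ≤ 0, where A's max([]) raises ValueError (for X ≥ 1 A always returns).
def Pre_solution (X : Int) (A : List Int) : Prop := 1 ≤ X
instance (X : Int) (A : List Int) : Decidable (Pre_solution X A) := by unfold Pre_solution; infer_instance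
def pvWitness_solution : Int × List Int := (2, [3, 1, 2])

def Spec_solution (X : Int) (A : List Int) (out : Int) : Prop := out = solution_alt X A
instance (X : Int) (A : List Int) (out : Int) : Decidable (Spec_solution X A out) := by unfold Spec_solution; infer_instance

-- ===== CLAIM (what is proved, stated in full; the proofs are below) =====
def Claim_equal_solution : Prop := ∀ (X : Int) (A : List Int), Dom_solution X A → Pre_solution X A → Spec_solution X A (solution X A)

-- ===== LEMMAS AND PROOFS =====

-- "all steps covered by the first n elements of A"
def Covers (X : Int) (A : List Int) (n : Nat) : Prop :=
  ∀ s : Int, 1 ≤ s → s ≤ X → s ∈ A.take n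

lemma covers_mono {X : Int} {A : List Int} {m n : Nat} (h : m ≤ n)
    (hc : Covers X A m) : Covers X A n := by
  intro s h1 h2
  have hm := hc s h1 h2
  have : s ∈ (A.take n).take m := by
    rw [List.take_take]; simpa [Nat.min_eq_left h] using hm
  exact List.take_subset _ _ this

-- uniqueness of the "first covering index"
lemma covers_unique {X : Int} {A : List Int} {a b : Nat}
    (ha1 : Covers X A (a+1)) (ha0 : ¬ Covers X A a)
    (hb1 : Covers X A (b+1)) (hb0 : ¬ Covers X A b) : a = b := by
  rcases lt_trichotomy a b with h | h | h
  · exact absurd (covers_mono (by omega) ha1) hb0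
  · exact h
  · exact absurd (covers_mono (by omega) hb1) ha0

-- a nodup list inside [1,X] missing some s of [1,X] has length < X
lemma length_lt_of_missing {X s : Int} {l : List Int} (hnd : l.Nodup)
    (hbd : ∀ y ∈ l, 1 ≤ y ∧ y ≤ X) (hs : s ∉ l) (hs1 : 1 ≤ s) (hs2 : s ≤ X) :
    (l.length : Int) < X := by
  have hsub : l.toFinset ⊆ (Finset.Icc 1 X).erase s := by
    intro y hy
    rw [List.mem_toFinset] at hy
    rcases hbd y hy with ⟨h1, h2⟩
    refine Finset.mem_erase.mpr ⟨?_, Finset.mem_Icc.mpr ⟨h1, h2⟩⟩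
    rintro rfl; exact hs hy
  have hcard := Finset.card_le_card hsub
  have herase : ((Finset.Icc 1 X).erase s).card = (Finset.Icc (1:Int) X).card - 1 :=
    Finset.card_erase_of_mem (Finset.mem_Icc.mpr ⟨hs1, hs2⟩)
  rw [List.toFinset_card_of_nodup hnd] at hcard
  rw [herase, Int.card_Icc] at hcard
  omega

-- a nodup list inside [1,X] of length X contains all of [1,X]
lemma mem_of_length_eq {X : Int} {l : List Int} (hnd : l.Nodup)
    (hbd : ∀ y ∈ l, 1 ≤ y ∧ y ≤ X) (hlen : (l.length : Int) = X) :
    ∀ s : Int, 1 ≤ s → s ≤ X → s ∈ l := by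
  have hsub : l.toFinset ⊆ Finset.Icc 1 X := by
    intro y hy
    rw [List.mem_toFinset] at hy
    exact Finset.mem_Icc.mpr (hbd y hy)
  have hcard : (Finset.Icc (1:Int) X).card ≤ l.toFinset.card := by
    rw [List.toFinset_card_of_nodup hnd, Int.card_Icc]; omega
  have heq := Finset.eq_of_subset_of_card_le hsub hcard
  intro s h1 h2
  have : s ∈ l.toFinset := heq ▸ Finset.mem_Icc.mpr ⟨h1, h2⟩
  exact List.mem_toFinset.mp this

-- B's loop returns -1 when some step is missing from A entirely
lemma solAltLoop_missing {X s : Int} (hs1 : 1 ≤ s) (hs2 : s ≤ X) :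
    ∀ (rest : List Int) (i : Int) (seen : PySem.Set Int), seen.Nodup →
      (∀ y ∈ seen, 1 ≤ y ∧ y ≤ X) → s ∉ seen → s ∉ rest →
      solAltLoop X rest i seen = -1 := by
  intro rest
  induction rest with
  | nil => intro i seen _ _ _ _; rfl
  | cons a rest ih =>
    intro i seen hnd hbd hsseen hsrest
    have hsa : s ≠ a := fun h => hsrest (h ▸ List.mem_cons_self)
    have hsrest' : s ∉ rest := fun h => hsrest (List.mem_cons_of_mem _ h)
    simp only [solAltLoop]
    by_cases hcond : 1 ≤ a ∧ a ≤ X ∧ ¬ a ∈ seen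
    · rw [if_pos hcond]
      have hnd' : (PySem.Set.add seen a).Nodup := PySem.Set.nodup_add seen a hnd
      have hbd' : ∀ y ∈ PySem.Set.add seen a, 1 ≤ y ∧ y ≤ X := by
        intro y hy
        rcases (PySem.Set.mem_add _ _ _).mp hy with h | h
        · exact hbd y h
        · exact h ▸ ⟨hcond.1, hcond.2.1⟩
      have hs' : s ∉ PySem.Set.add seen a := by
        intro h
        rcases (PySem.Set.mem_add _ _ _).mp h with h | h
        · exact hsseen h
        · exact hsa h
      have hlt := length_lt_of_missing hnd' hbd' hs' hs1 hs2
      rw [if_neg (by omega)]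
      exact ih (i+1) _ hnd' hbd' hs' hsrest'
    · rw [if_neg hcond]
      exact ih (i+1) seen hnd hbd hsseen hsrest' 

-- B's loop invariant in the all-present case
lemma solAltLoop_covers {X : Int} {A : List Int}
    (hall : ∀ s : Int, 1 ≤ s → s ≤ X → s ∈ A) (hX : 1 ≤ X) :
    ∀ (rest p : List Int) (seen : PySem.Set Int), A = p ++ rest → seen.Nodup →
      (∀ y, y ∈ seen ↔ 1 ≤ y ∧ y ≤ X ∧ y ∈ p) → (seen.length : Int) ≠ X →
      ∃ n : Nat, solAltLoop X rest (p.length) seen = (n : Int) ∧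
        Covers X A (n+1) ∧ ¬ Covers X A n := by
  intro rest
  induction rest with
  | nil =>
    intro p seen hA hnd hmem hne
    exfalso
    apply hne
    have h1 : seen.toFinset = Finset.Icc 1 X := by
      apply Finset.Subset.antisymm
      · intro y hy
        rw [List.mem_toFinset] at hy
        rcases (hmem y).mp hy with ⟨ha, hb, _⟩
        exact Finset.mem_Icc.mpr ⟨ha, hb⟩
      · intro y hy
        rw [Finset.mem_Icc] at hy
        rw [List.mem_toFinset]
        refine (hmem y).mpr ⟨hy.1, hy.2, ?_⟩
        have := hall y hy.1 hy.2
        rwa [hA, List.append_nil] at this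
    have : seen.toFinset.card = seen.length := List.toFinset_card_of_nodup hnd
    rw [h1, Int.card_Icc] at this
    omega
  | cons a rest ih =>
    intro p seen hA hnd hmem hne
    simp only [solAltLoop]
    have htakep : A.take p.length = p := by rw [hA]; exact List.take_left
    by_cases hcond : 1 ≤ a ∧ a ≤ X ∧ ¬ a ∈ seen
    · rw [if_pos hcond]
      have hnd' : (PySem.Set.add seen a).Nodup := PySem.Set.nodup_add seen a hnd
      have hmem' : ∀ y, y ∈ PySem.Set.add seen a ↔ 1 ≤ y ∧ y ≤ X ∧ y ∈ p ++ [a] := by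
        intro y
        rw [PySem.Set.mem_add seen a y]
        constructor
        · rintro (h | rfl)
          · rcases (hmem y).mp h with ⟨h1, h2, h3⟩
            exact ⟨h1, h2, List.mem_append_left _ h3⟩
          · exact ⟨hcond.1, hcond.2.1, List.mem_append_right _ List.mem_cons_self⟩
        · rintro ⟨h1, h2, h3⟩
          rcases List.mem_append.mp h3 with h | h
          · exact Or.inl ((hmem y).mpr ⟨h1, h2, h⟩)
          · exact Or.inr (List.mem_singleton.mp h)
      have hbd' : ∀ y ∈ PySem.Set.add seen a, 1 ≤ y ∧ y ≤ X := by
        intro y hy; rcases (hmem' y).mp hy with ⟨h1, h2, _⟩; exact ⟨h1, h2⟩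
      have htake1 : A.take (p.length + 1) = p ++ [a] := by
        rw [hA, List.take_append]
        simp
      by_cases hsz : ((PySem.Set.add seen a).length : Int) = X
      · rw [if_pos hsz]
        refine ⟨p.length, rfl, ?_, ?_⟩
        · intro s h1 h2
          rw [htake1]
          exact ((hmem' s).mp (mem_of_length_eq hnd' hbd' hsz s h1 h2)).2.2
        · intro hc
          have hanp : a ∉ p := by
            intro h
            exact hcond.2.2 ((hmem a).mpr ⟨hcond.1, hcond.2.1, h⟩)
          have := hc a hcond.1 hcond.2.1
          rw [htakep] at this
          exact hanp this
      · rw [if_neg hsz]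
        have hres := ih (p ++ [a]) (PySem.Set.add seen a)
          (by rw [hA]; simp) hnd' hmem' hsz
        simpa using hres
    · rw [if_neg hcond]
      have hmem'' : ∀ y, y ∈ seen ↔ 1 ≤ y ∧ y ≤ X ∧ y ∈ p ++ [a] := by
        intro y
        constructor
        · rintro h
          rcases (hmem y).mp h with ⟨h1, h2, h3⟩
          exact ⟨h1, h2, List.mem_append_left _ h3⟩
        · rintro ⟨h1, h2, h3⟩
          rcases List.mem_append.mp h3 with h | h
          · exact (hmem y).mpr ⟨h1, h2, h⟩
          · rcases List.mem_singleton.mp h with rfl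
            by_contra hny
            exact hcond ⟨h1, h2, hny⟩
      have hres := ih (p ++ [a]) seen (by rw [hA]; simp) hnd hmem'' hne
      simpa using hres

-- ===== VERDICT (by name: the statement is the Claim_ definition above) =====
lemma mem_take_of_getElem {A : List Int} {s : Int} {j n : Nat}
    (h : j < A.length) (he : A[j] = s) (hn : j < n) : s ∈ A.take n := by
  have hlt : j < (A.take n).length := by simp [List.length_take]; omega
  have h2 : (A.take n)[j]'hlt = A[j] := List.getElem_take
  rw [← he, ← h2]; exact List.getElem_mem _

lemma getElem_of_mem_take {A : List Int} {s : Int} {n : Nat} (h : s ∈ A.take n) :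
    ∃ j, j < n ∧ ∃ hj : j < A.length, A[j] = s := by
  obtain ⟨j, hj, he⟩ := List.mem_iff_getElem.mp h
  have hl : j < n := by simp [List.length_take] at hj; omega
  have hl2 : j < A.length := by simp [List.length_take] at hj; omega
  exact ⟨j, hl, hl2, by rw [← he]; exact (List.getElem_take).symm⟩

theorem solution_spec : Claim_equal_solution := by
  intro X A _ hXpre
  unfold Spec_solution
  have hX : (1:Int) ≤ X := hXpre
  by_cases hmiss : ∃ s : Int, 1 ≤ s ∧ s ≤ X ∧ s ∉ A
  · obtain ⟨s, hs1, hs2, hsA⟩ := hmiss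
    have hA : solution X A = -1 := by
      unfold solution
      rw [if_pos ?_]
      refine List.any_eq_true.mpr ⟨s, ?_, ?_⟩
      · exact PySem.List.mem_pyRange_one.mpr ⟨hs1, by omega⟩
      · simpa using hsA
    have hB : solution_alt X A = -1 := by
      unfold solution_alt
      exact solAltLoop_missing hs1 hs2 A 0 PySem.Set.empty
        (by simp [PySem.Set.empty]) (by simp [PySem.Set.empty])
        (by simp [PySem.Set.empty]) hsA
    rw [hA, hB]
  · push Not at hmiss
    -- B side: first covering index
    obtain ⟨n, hn, hcov1, hcov0⟩ := solAltLoop_covers hmiss hX A [] PySem.Set.empty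
      rfl (by simp [PySem.Set.empty]) (by simp [PySem.Set.empty])
      (by simp [PySem.Set.empty]; omega)
    have hB : solution_alt X A = (n : Int) := by
      unfold solution_alt
      simpa using hn
    -- A side
    have hany : (PySem.List.pyRange 1 (X+1) 1).any (fun s => !(A.contains s)) = false := by
      rw [List.any_eq_false]
      intro s hs
      rw [PySem.List.mem_pyRange_one] at hs
      simp [hmiss s hs.1 (by omega)]
    have h1mem : (1:Int) ∈ PySem.List.pyRange 1 (X+1) 1 :=
      PySem.List.mem_pyRange_one.mpr ⟨le_refl _, by omega⟩
    set positions : List Int :=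
      (PySem.List.pyRange 1 (X+1) 1).map (fun s => (((PySem.List.index? A s).getD 0 : Nat) : Int)) with hpos
    have hpne : positions ≠ [] := by
      intro h
      rw [hpos] at h
      rw [List.map_eq_nil_iff.mp h] at h1mem
      exact List.not_mem_nil h1mem
    obtain ⟨M, hM⟩ : ∃ M, PySem.List.max? positions (fun y => y) = some M := by
      cases hc : PySem.List.max? positions (fun y => y) with
      | none => exact absurd ((PySem.List.max?_eq_none_iff _ _).mp hc) hpne
      | some m => exact ⟨m, rfl⟩
    have hA : solution X A = M := by
      unfold solution
      rw [if_neg (by rw [hany]; simp)]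
      simp only [← hpos, hM]
    -- M is the first-occurrence index of some step s0
    obtain ⟨s0, hs0mem, hMs0⟩ := List.mem_map.mp (PySem.List.max?_mem hM)
    have hs0rng := PySem.List.mem_pyRange_one.mp hs0mem
    have hs0A : s0 ∈ A := hmiss s0 hs0rng.1 (by omega)
    obtain ⟨k, hk⟩ := Option.isSome_iff_exists.mp ((PySem.List.index?_isSome_iff _ _).mpr hs0A)
    obtain ⟨hklen, hAk, hkmin⟩ := PySem.List.getElem_of_index?_eq_some hk
    have hMk : M = (k : Int) := by rw [← hMs0, hk]; rfl
    -- A's value is a first covering index too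
    have hcovA1 : Covers X A (k+1) := by
      intro s h1 h2
      have hsA : s ∈ A := hmiss s h1 h2
      obtain ⟨j, hj⟩ := Option.isSome_iff_exists.mp ((PySem.List.index?_isSome_iff _ _).mpr hsA)
      obtain ⟨hjlen, hAj, _⟩ := PySem.List.getElem_of_index?_eq_some hj
      have hsmem : s ∈ PySem.List.pyRange 1 (X+1) 1 :=
        PySem.List.mem_pyRange_one.mpr ⟨h1, by omega⟩
      have hle : (((PySem.List.index? A s).getD 0 : Nat) : Int) ≤ M :=
        PySem.List.max?_isMax hM _ (List.mem_map_of_mem hsmem)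
      rw [hj, hMk] at hle
      have : j ≤ k := by exact_mod_cast hle
      exact mem_take_of_getElem hjlen hAj (by omega)
    have hcovA0 : ¬ Covers X A k := by
      intro hc
      obtain ⟨j, hjk, hjlen, hAj⟩ := getElem_of_mem_take (hc s0 hs0rng.1 (by omega))
      exact hkmin j hjk hAj
    have := covers_unique hcovA1 hcovA0 hcov1 hcov0
    rw [hA, hB, hMk, this]
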